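-- pv_equiv track=rewrite | github.com/bupt-htl502/NT-Agent | Agent/file_processing/methods/tlsMap.py | str2hex1
-- ===== SOURCE A (Python) =====
-- def str2hex1(hex_string, hex_len):
--     """
--     将原始密文十六进制编码字符串转化为十六进制双字节字符串(增加空格进行划分和填充)
--     :param hex_string:原始密文十六进制编码字符串
--     :param hex_len:密文长度
--     :return:十六进制双字节字符串
--     """
--     result = ''
--     str_len = len(hex_string)
--     for i in range(hex_len):
--         # 对字节范围进行判断，避免溢出
--         if 4 * i < str_len:
--             # 双字节均有效
--             hex_i = hex_string[4*i:4*i+4]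
--             result += ' ' + hex_i
--         elif 4*i+2 < str_len:
--             # 仅单字节有效
--             hex_i = hex_string[4*i: 4*i+2] + '00'
--             result += ' ' + hex_i
--         else:
--             # 进行填充
--             hex_i = '0000'
--             result += ' ' + hex_i
--     result = result[1:]  # 去除第一个空格
--     return result
-- ===== SOURCE B (Python) =====
-- def str2hex1(hex_string, hex_len):
--     if hex_len <= 0:
--         return ''
--     limit = min(len(hex_string), 4 * hex_len)
--     pieces = []
--     for j in range(limit):
--         if j and j % 4 == 0:
--             pieces.append(' ')
--         pieces.append(hex_string[j])
--     pad = hex_len - (limit + 3) // 4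
--     filler = ' 0000' * pad
--     return ''.join(pieces) + (filler if pieces else filler[1:])
-- ===== Notes on version B (the rewrite author's own statement) =====
-- stated objective: alternative
-- what changed: Instead of A's per-group loop over range(hex_len) with three-way branching and 4-char slicing, B never slices groups: it streams the in-range characters one by one, inserting a separator space whenever the index hits a multiple of 4, then appends the whole padding block ' 0000'*pad computed arithmetically in one string repetition.
import Mathlib
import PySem

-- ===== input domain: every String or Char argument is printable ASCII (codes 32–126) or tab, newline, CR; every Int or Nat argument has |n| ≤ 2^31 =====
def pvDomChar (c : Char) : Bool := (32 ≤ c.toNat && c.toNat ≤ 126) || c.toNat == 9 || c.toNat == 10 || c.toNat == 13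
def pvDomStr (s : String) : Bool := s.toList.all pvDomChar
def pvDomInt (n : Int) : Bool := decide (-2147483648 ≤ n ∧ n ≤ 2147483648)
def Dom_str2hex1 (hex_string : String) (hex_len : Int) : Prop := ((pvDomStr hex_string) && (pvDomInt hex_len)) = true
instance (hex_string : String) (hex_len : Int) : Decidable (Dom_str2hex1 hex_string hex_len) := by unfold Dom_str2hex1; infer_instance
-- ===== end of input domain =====

-- B streams the in-range characters one by one, inserting a space at every index that is a
-- positive multiple of 4, and appends the arithmetically-sized padding block ' 0000'*pad in one
-- repetition — no per-group slicing, no branching loop over range(hex_len) (objective: alternative).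

-- ===== PORT A =====
-- Literal port of A's loop: accumulate ' ' + group per i in range(hex_len), then result[1:].
def str2hex1 (hex_string : String) (hex_len : Int) : String :=
  let cs := hex_string.toList
  let strLen : Int := (cs.length : Int)
  let result : List Char :=
    (PySem.List.pyRange 0 hex_len 1).foldl
      (fun acc i =>
        if 4 * i < strLen then
          acc ++ ' ' :: PySem.List.slice cs (some (4 * i)) (some (4 * i + 4))
        else if 4 * i + 2 < strLen then
          acc ++ ' ' :: (PySem.List.slice cs (some (4 * i)) (some (4 * i + 2)) ++ ['0', '0'])
        else
          acc ++ ' ' :: ['0', '0', '0', '0'])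
      []
  String.ofList (PySem.List.slice result (some 1) none)

-- ===== PORT B =====
-- Literal port of Source B: early return for hex_len <= 0; per-character loop over range(limit)
-- appending ' ' when j is a positive multiple of 4 then the character; padding block ' 0000'*pad.
def str2hex1_alt (hex_string : String) (hex_len : Int) : String :=
  if hex_len ≤ 0 then "" else
  let cs := hex_string.toList
  let limit : Int := min (cs.length : Int) (4 * hex_len)
  let pieces : List Char :=
    (PySem.List.pyRange 0 limit 1).foldl
      (fun acc j =>
        (if j ≠ 0 ∧ PySem.Int.mod j 4 = 0 then acc ++ [' '] else acc)
          ++ [PySem.List.pyGetD cs j ' '])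
      []
  let pad : Int := hex_len - PySem.Int.floordiv (limit + 3) 4
  let filler : List Char := (List.replicate pad.toNat (' ' :: ['0', '0', '0', '0'])).flatten
  String.ofList (pieces ++ (if pieces.isEmpty then PySem.List.slice filler (some 1) none else filler))

-- ===== PRECONDITION & SPEC =====
def Spec_str2hex1 (hex_string : String) (hex_len : Int) (out : String) : Prop := out = str2hex1_alt hex_string hex_len
instance (hex_string : String) (hex_len : Int) (out : String) : Decidable (Spec_str2hex1 hex_string hex_len out) := by unfold Spec_str2hex1; infer_instance

-- ===== CLAIM (what is proved, stated in full; the proofs are below) =====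
def Claim_equal_str2hex1 : Prop := ∀ (hex_string : String) (hex_len : Int), Dom_str2hex1 hex_string hex_len → Spec_str2hex1 hex_string hex_len (str2hex1 hex_string hex_len)

-- ===== LEMMAS AND PROOFS =====

-- the group A computes at index i, as a function
def groupA (cs : List Char) (i : Int) : List Char :=
  if 4 * i < (cs.length : Int) then PySem.List.slice cs (some (4 * i)) (some (4 * i + 4))
  else if 4 * i + 2 < (cs.length : Int) then
    PySem.List.slice cs (some (4 * i)) (some (4 * i + 2)) ++ ['0', '0']
  else ['0', '0', '0', '0']

theorem map_groupA_eq (cs : List Char) (n : Int) :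
    (PySem.List.pyRange 0 n 1).map (groupA cs)
    = (PySem.List.pyRange 0 (min (PySem.Int.floordiv ((cs.length : Int) + 3) 4) n) 1).map
        (fun i => PySem.List.slice cs (some (4 * i)) (some (4 * i + 4)))
      ++ List.replicate (n - min (PySem.Int.floordiv ((cs.length : Int) + 3) 4) n).toNat
          ['0', '0', '0', '0'] := by
  have hL0 : (0:Int) <= (cs.length : Int) := Int.natCast_nonneg _
  rw [PySem.Int.floordiv_eq_ediv_of_pos (by norm_num : (0:Int) < 4)]
  set L : Int := (cs.length : Int) with hL
  set v : Int := min ((L + 3) / 4) n with hv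
  have hdiv : 4 * ((L + 3) / 4) <= L + 3 ∧ L + 3 < 4 * ((L + 3) / 4) + 4 := by omega
  by_cases hn : 0 <= n
  · have h0v : 0 <= v := by omega
    have hvn : v <= n := by omega
    rw [PySem.List.pyRange_one_append 0 v n h0v hvn, List.map_append]
    congr 1
    · apply List.map_congr_left
      intro i hi
      obtain ⟨h1, h2⟩ := PySem.List.mem_pyRange_one.mp hi
      have h4 : 4 * i < L := by omega
      simp only [groupA, ← hL]
      rw [if_pos h4]
    · have hc : ∀ i ∈ PySem.List.pyRange v n 1, groupA cs i = ['0', '0', '0', '0'] := by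
        intro i hi
        obtain ⟨h1, h2⟩ := PySem.List.mem_pyRange_one.mp hi
        have h4 : ¬ (4 * i < L) := by omega
        have h5 : ¬ (4 * i + 2 < L) := by omega
        simp only [groupA, ← hL]
        rw [if_neg h4, if_neg h5]
      rw [List.map_congr_left hc, List.map_const', PySem.List.length_pyRange_one]
  · have hneg : n < 0 := by omega
    have hvn : v = n := by omega
    rw [PySem.List.pyRange_one_eq_nil (by omega : n <= 0), hvn,
        PySem.List.pyRange_one_eq_nil (by omega : n <= 0)]
    simp

theorem take_map_getD (cs : List Char) (a m : Nat) (h : m ≤ cs.length) :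
    (PySem.List.pyRange (a : Int) (m : Int) 1).map (fun j => PySem.List.pyGetD cs j ' ')
      = (cs.take m).drop a := by
  have h1 : ∀ j ∈ PySem.List.pyRange (a : Int) (m : Int) 1,
      PySem.List.pyGetD cs j ' ' = PySem.List.pyGetD (cs.take m) j ' ' := by
    intro j hj
    obtain ⟨hj1, hj2⟩ := PySem.List.mem_pyRange_one.mp hj
    have h0 : 0 ≤ j := le_trans (Int.natCast_nonneg a) hj1
    rw [PySem.List.pyGetD_eq_getElem cs ' ' h0 (by omega),
        PySem.List.pyGetD_eq_getElem (cs.take m) ' ' h0 (by simp; omega)]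
    simp [List.getElem_take]
  rw [List.map_congr_left h1]
  have h2 : (m : Int) = ((cs.take m).length : Int) := by simp; omega
  rw [h2, PySem.List.map_pyGetD_pyRange' _ _ (Int.natCast_nonneg a)]
  simp

def emit (cs : List Char) (j : Int) : List Char :=
  (if j % 4 = 0 then [' '] else []) ++ [PySem.List.pyGetD cs j ' ']

theorem flatMap_emit_block (cs : List Char) (m : Nat) (h1 : 0 < m) (h4 : m ≤ 4)
    (hm : m ≤ cs.length) :
    (PySem.List.pyRange 0 (m : Int) 1).flatMap (emit cs) = ' ' :: cs.take m := by
  rw [PySem.List.pyRange_one_cons (by exact_mod_cast h1)]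
  have hrest : ∀ j ∈ PySem.List.pyRange (0+1: Int) (m : Int) 1,
      emit cs j = [PySem.List.pyGetD cs j ' '] := by
    intro j hj
    obtain ⟨hj1, hj2⟩ := PySem.List.mem_pyRange_one.mp hj
    have : ¬ (j % 4 = 0) := by omega
    simp [emit, this]
  rw [List.flatMap_cons, List.flatMap_congr hrest, ← List.map_eq_flatMap]
  have : (0 + 1 : Int) = ((1 : Nat) : Int) := by norm_num
  rw [this, take_map_getD cs 1 m hm]
  have hhead : emit cs 0 = [' ', PySem.List.pyGetD cs 0 ' '] := by simp [emit]
  rw [hhead]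
  have : PySem.List.pyGetD cs 0 ' ' :: (cs.take m).tail = cs.take m := by
    rcases cs with _ | ⟨c, rest⟩
    · simp at hm; omega
    · rcases m with _ | m
      · omega
      · simp [PySem.List.pyGetD_zero_cons]
  rw [List.drop_one] at *
  simp [this]

theorem emit_shift (cs : List Char) (k : Nat) :
    emit cs ((k : Int) + 4) = emit (cs.drop 4) (k : Int) := by
  have h1 : ((k : Int) + 4) % 4 = (k : Int) % 4 := by omega
  have h2 : PySem.List.pyGetD cs ((k : Int) + 4) ' '
      = PySem.List.pyGetD (cs.drop 4) (k : Int) ' ' := by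
    have : ((k : Int) + 4) = (((k + 4 : Nat)) : Int) := by push_cast; ring
    rw [this, PySem.List.pyGetD_natCast, PySem.List.pyGetD_natCast]
    simp [List.getD, List.getElem?_drop, Nat.add_comm]
  simp [emit, h1, h2]

theorem emit_eq_groups : ∀ (m : Nat), ∀ (cs : List Char), m ≤ cs.length → ((4 ∣ m) ∨ m = cs.length) →
    (PySem.List.pyRange 0 (m : Int) 1).flatMap (emit cs)
    = (PySem.List.pyRange 0 (((m + 3) / 4 : Nat) : Int) 1).flatMap
        (fun i => ' ' :: PySem.List.slice cs (some (4 * i)) (some (4 * i + 4))) := by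
  intro m
  induction m using Nat.strong_induction_on with
  | _ m ih =>
    intro cs hm hd
    rcases Nat.eq_zero_or_pos m with h0 | h0
    · subst h0; simp [PySem.List.pyRange_one_eq_nil]
    by_cases hle : m ≤ 4
    · -- one (possibly partial) group
      have hc : ((m + 3) / 4 : Nat) = 1 := by omega
      rw [flatMap_emit_block cs m h0 hle hm, hc]
      have : PySem.List.pyRange 0 ((1 : Nat) : Int) 1 = [0] := by decide
      rw [this, List.flatMap_cons]
      have hsl : PySem.List.slice cs (some (4 * 0)) (some (4 * 0 + 4)) = cs.take 4 := by
        rw [show (4 * (0:Int)) = ((0:Nat):Int) by norm_num,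
            show ((((0:Nat):Int)) + 4) = ((4:Nat):Int) by norm_num, PySem.List.slice_natCast]
        simp
      rw [hsl]
      have : cs.take m = cs.take 4 := by
        rcases hd with h | h
        · interval_cases m <;> simp_all
        · rw [h, List.take_of_length_le (le_refl _), List.take_of_length_le (by omega)]
      simp [this]
    · -- peel the first full group of 4
      have h4m : (4 : Nat) ≤ m := by omega
      have hsplit : PySem.List.pyRange 0 (m : Int) 1
          = PySem.List.pyRange 0 4 1 ++ PySem.List.pyRange 4 (m : Int) 1 :=
        PySem.List.pyRange_one_append 0 4 (m : Int) (by norm_num) (by exact_mod_cast h4m)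
      rw [hsplit, List.flatMap_append]
      have hblock : (PySem.List.pyRange 0 (4 : Int) 1).flatMap (emit cs) = ' ' :: cs.take 4 := by
        have : ((4 : Nat) : Int) = (4 : Int) := by norm_num
        rw [← this, flatMap_emit_block cs 4 (by norm_num) (le_refl _) (by omega)]
      -- shift the remaining indices down by 4
      have hshift : (PySem.List.pyRange 4 (m : Int) 1).flatMap (emit cs)
          = (PySem.List.pyRange 0 ((m - 4 : Nat) : Int) 1).flatMap (emit (cs.drop 4)) := by
        rw [PySem.List.pyRange_one 4 (m : Int), PySem.List.pyRange_one 0 ((m - 4 : Nat) : Int)]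
        have he : ((m : Int) - 4).toNat = (((m - 4 : Nat) : Int) - 0).toNat := by omega
        rw [he, List.flatMap_map, List.flatMap_map]
        apply List.flatMap_congr
        intro k _
        have : (4 : Int) + (k : Int) = (k : Int) + 4 := by ring
        rw [this, emit_shift]
        norm_num
      rw [hblock, hshift, ih (m - 4) (by omega) (cs.drop 4) (by simp; omega)
        (by rcases hd with h | h; exacts [Or.inl (by omega), Or.inr (by simp; omega)])]
      -- reassemble the right-hand side
      have hc : ((m + 3) / 4 : Nat) = ((m - 4 + 3) / 4 : Nat) + 1 := by omega
      rw [hc]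
      have hcons : PySem.List.pyRange 0 ((((m - 4 + 3) / 4 : Nat) + 1 : Nat) : Int) 1
          = 0 :: PySem.List.pyRange 1 ((((m - 4 + 3) / 4 : Nat) : Int) + 1) 1 := by
        rw [PySem.List.pyRange_one_cons (by push_cast; omega)]
        norm_num
      rw [hcons, List.flatMap_cons]
      have hg0 : PySem.List.slice cs (some (4 * 0)) (some (4 * 0 + 4)) = cs.take 4 := by
        rw [show (4 * (0:Int)) = ((0:Nat):Int) by norm_num,
            show ((((0:Nat):Int)) + 4) = ((4:Nat):Int) by norm_num, PySem.List.slice_natCast]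
        simp
      rw [hg0]
      have hshiftR : (PySem.List.pyRange 1 ((((m - 4 + 3) / 4 : Nat) : Int) + 1) 1).flatMap
            (fun i => ' ' :: PySem.List.slice cs (some (4 * i)) (some (4 * i + 4)))
          = (PySem.List.pyRange 0 (((m - 4 + 3) / 4 : Nat) : Int) 1).flatMap
            (fun i => ' ' :: PySem.List.slice (cs.drop 4) (some (4 * i)) (some (4 * i + 4))) := by
        rw [PySem.List.pyRange_one 1 _, PySem.List.pyRange_one 0 _]
        have he : ((((m - 4 + 3) / 4 : Nat) : Int) + 1 - 1).toNat
            = ((((m - 4 + 3) / 4 : Nat) : Int) - 0).toNat := by omega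
        rw [he, List.flatMap_map, List.flatMap_map]
        apply List.flatMap_congr
        intro k _
        have h1 : (4 * ((1 : Int) + (k : Nat))) = ((4 * k + 4 : Nat) : Int) := by push_cast; ring
        have h2 : (4 * ((1 : Int) + (k : Nat)) + 4) = ((4 * k + 4 + 4 : Nat) : Int) := by push_cast; ring
        have h3 : (4 * ((0 : Int) + (k : Nat))) = ((4 * k : Nat) : Int) := by push_cast; ring
        have h4 : (4 * ((0 : Int) + (k : Nat)) + 4) = ((4 * k + 4 : Nat) : Int) := by push_cast; ring
        rw [h2, h1, h4, h3, PySem.List.slice_natCast, PySem.List.slice_natCast]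
        simp [List.drop_drop, Nat.add_comm]
      rw [hshiftR]

theorem str2hex1_spec : Claim_equal_str2hex1 := by
  intro s n _
  simp only [Spec_str2hex1, str2hex1, str2hex1_alt]
  set cs := s.toList with hcs
  by_cases hn : n ≤ 0
  · rw [if_pos hn, PySem.List.pyRange_one_eq_nil hn]
    simp [PySem.List.slice_from_one]
  · rw [if_neg hn]
    have hn0 : 0 < n := by omega
    have hL0 : (0 : Int) ≤ (cs.length : Int) := Int.natCast_nonneg _
    -- A's loop body as an append of a per-index block
    have hbodyA : (fun (acc : List Char) (i : Int) =>
        if 4 * i < ((cs.length : Int)) then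
          acc ++ ' ' :: PySem.List.slice cs (some (4 * i)) (some (4 * i + 4))
        else if 4 * i + 2 < ((cs.length : Int)) then
          acc ++ ' ' :: (PySem.List.slice cs (some (4 * i)) (some (4 * i + 2)) ++ ['0', '0'])
        else acc ++ ' ' :: ['0', '0', '0', '0'])
        = fun acc i => acc ++ ' ' :: groupA cs i := by
      funext acc i
      simp only [groupA]
      split_ifs <;> rfl
    -- B's loop body likewise
    have hbodyB : (fun (acc : List Char) (j : Int) =>
        (if j ≠ 0 ∧ PySem.Int.mod j 4 = 0 then acc ++ [' '] else acc)
          ++ [PySem.List.pyGetD cs j ' '])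
        = fun acc j => acc ++ ((if j ≠ 0 ∧ PySem.Int.mod j 4 = 0 then [' '] else [])
          ++ [PySem.List.pyGetD cs j ' ']) := by
      funext acc j
      split_ifs <;> simp
    rw [hbodyA, hbodyB, PySem.List.foldl_append_eq_flatMap, PySem.List.foldl_append_eq_flatMap,
      List.nil_append, List.nil_append, PySem.List.slice_from_one]
    set L : Int := (cs.length : Int) with hLdef
    set limit : Int := min L (4 * n) with hlimdef
    set v : Int := min (PySem.Int.floordiv (L + 3) 4) n with hvdef
    have hfd : PySem.Int.floordiv (L + 3) 4 = (L + 3) / 4 :=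
      PySem.Int.floordiv_eq_ediv_of_pos (by norm_num)
    have hceil : PySem.Int.floordiv (limit + 3) 4 = v := by
      rw [PySem.Int.floordiv_eq_ediv_of_pos (by norm_num), hvdef, hfd]
      omega
    -- A's flatMap, regrouped into valid groups and the padding block
    have hAflat : (PySem.List.pyRange 0 n 1).flatMap (fun i => ' ' :: groupA cs i)
        = (PySem.List.pyRange 0 v 1).flatMap
            (fun i => ' ' :: PySem.List.slice cs (some (4 * i)) (some (4 * i + 4)))
          ++ (List.replicate (n - v).toNat (' ' :: ['0', '0', '0', '0'])).flatten := by
      have h1 : (PySem.List.pyRange 0 n 1).flatMap (fun i => ' ' :: groupA cs i)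
          = ((PySem.List.pyRange 0 n 1).map (groupA cs)).flatMap (fun gl => ' ' :: gl) := by
        rw [List.flatMap_map]
      rw [h1, map_groupA_eq, ← hvdef, List.flatMap_append, List.flatMap_map,
        List.flatMap_replicate]
    rw [hAflat]
    set filler := (List.replicate (n - v).toNat (' ' :: ['0', '0', '0', '0'])).flatten with hfil
    rw [hceil]
    by_cases hlim : limit ≤ 0
    · -- empty string: no valid groups, only padding
      have hveq : v = 0 := by rw [hvdef, hfd]; omega
      rw [PySem.List.pyRange_one_eq_nil hlim, PySem.List.pyRange_one_eq_nil (by omega : v ≤ 0)]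
      simp [PySem.List.slice_from_one, hfil]
    · have hlim0 : 0 < limit := by omega
      set m : Nat := limit.toNat with hmdef
      have hmcast : (m : Int) = limit := Int.toNat_of_nonneg (by omega)
      have hmlen : m ≤ cs.length := by omega
      have hdvd : 4 ∣ m ∨ m = cs.length := by
        by_cases h : L ≤ 4 * n
        · right; omega
        · left; omega
      have hcore := emit_eq_groups m cs hmlen hdvd
      have hceil2 : (((m + 3) / 4 : Nat) : Int) = v := by
        rw [hvdef, hfd]
        omega
      rw [hmcast, hceil2] at hcore
      -- the fully-spaced stream has exactly one extra leading space
      have hge : (PySem.List.pyRange 0 limit 1).flatMap (emit cs)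
          = ' ' :: (PySem.List.pyRange 0 limit 1).flatMap
              (fun j => (if j ≠ 0 ∧ PySem.Int.mod j 4 = 0 then [' '] else [])
                ++ [PySem.List.pyGetD cs j ' ']) := by
        rw [PySem.List.pyRange_one_cons hlim0, List.flatMap_cons, List.flatMap_cons]
        have hrest : ∀ j ∈ PySem.List.pyRange (0 + 1) limit 1,
            emit cs j = (if j ≠ 0 ∧ PySem.Int.mod j 4 = 0 then [' '] else [])
              ++ [PySem.List.pyGetD cs j ' '] := by
          intro j hj
          obtain ⟨hj1, hj2⟩ := PySem.List.mem_pyRange_one.mp hj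
          have hj0 : j ≠ 0 := by omega
          simp [emit, hj0]
        rw [List.flatMap_congr hrest]
        simp [emit]
      rw [hge] at hcore
      set pieces := (PySem.List.pyRange 0 limit 1).flatMap
          (fun j => (if j ≠ 0 ∧ PySem.Int.mod j 4 = 0 then [' '] else [])
            ++ [PySem.List.pyGetD cs j ' ']) with hpieces
      have hval : (PySem.List.pyRange 0 v 1).flatMap
          (fun i => ' ' :: PySem.List.slice cs (some (4 * i)) (some (4 * i + 4)))
          = ' ' :: pieces := hcore.symm
      rw [hval]
      have hne : pieces ≠ [] := by
        rw [hpieces, PySem.List.pyRange_one_cons hlim0, List.flatMap_cons]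
        simp
      rw [if_neg (by simpa [List.isEmpty_iff] using hne)]
      simp
      rw [hfil]
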